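-- pv_equiv track=rewrite | github.com/paiml/depyler | examples/hard_wave_pattern.py | generate_wave
-- ===== SOURCE A (Python) =====
-- def generate_wave(amplitude: int, period: int, length: int) -> list[int]:
--     """Generate a triangular wave pattern as integer array.
--     Goes up to amplitude, then down to -amplitude, repeating."""
--     result: list[int] = []
--     if period <= 0 or amplitude <= 0:
--         i: int = 0
--         while i < length:
--             result.append(0)
--             i = i + 1
--         return result
--     i2: int = 0
--     while i2 < length:
--         pos: int = i2 % period
--         quarter: int = period // 4
--         if quarter == 0:
--             quarter = 1
--         half: int = period // 2
--         if pos <= quarter: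
--             val: int = amplitude * pos // quarter
--         elif pos <= half:
--             val2: int = amplitude * (half - pos) // quarter
--             val = val2
--         elif pos <= half + quarter:
--             val3: int = -amplitude * (pos - half) // quarter
--             val = val3
--         else:
--             val4: int = -amplitude * (period - pos) // quarter
--             val = val4
--         result.append(val)
--         i2 = i2 + 1
--     return result
-- ===== SOURCE B (Python) =====
-- def generate_wave(amplitude: int, period: int, length: int) -> list[int]:
--     """Triangular wave via a precomputed single-period lookup table."""
--     if period <= 0 or amplitude <= 0:
--         return [0] * length
--     quarter = period // 4
--     if quarter == 0:
--         quarter = 1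
--     half = period // 2
--     cycle: list[int] = []
--     for pos in range(min(period, length)):
--         if pos <= quarter:
--             val = amplitude * pos // quarter
--         elif pos <= half:
--             val = amplitude * (half - pos) // quarter
--         elif pos <= half + quarter:
--             val = -amplitude * (pos - half) // quarter
--         else:
--             val = -amplitude * (period - pos) // quarter
--         cycle.append(val)
--     return [cycle[i % period] for i in range(length)]
-- ===== Notes on version B (the rewrite author's own statement) =====
-- stated objective: alternative
-- what changed: B precomputes the piecewise wave values once for a single period (capped at length) into a lookup table and builds the result by indexing cycle[i % period], instead of recomputing quarter/half and the floor-division branches for every output element.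
import Mathlib
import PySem

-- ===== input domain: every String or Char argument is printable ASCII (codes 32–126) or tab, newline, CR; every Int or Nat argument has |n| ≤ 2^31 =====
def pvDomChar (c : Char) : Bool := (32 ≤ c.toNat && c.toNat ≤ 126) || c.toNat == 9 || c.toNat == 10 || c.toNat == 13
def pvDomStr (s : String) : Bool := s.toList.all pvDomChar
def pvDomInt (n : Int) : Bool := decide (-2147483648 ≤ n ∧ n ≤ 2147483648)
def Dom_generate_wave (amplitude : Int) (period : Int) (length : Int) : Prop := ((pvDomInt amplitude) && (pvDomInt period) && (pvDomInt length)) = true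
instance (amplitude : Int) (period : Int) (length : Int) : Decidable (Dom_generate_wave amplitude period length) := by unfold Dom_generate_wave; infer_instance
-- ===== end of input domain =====

-- B precomputes one period of wave values into a lookup table (size min(period, length)) and indexes it by i % period, instead of recomputing the piecewise branches per element.


-- ===== PORT A =====
-- literal transliteration: the while-append loop over i2 becomes a map over range(length)
def generate_wave (amplitude : Int) (period : Int) (length : Int) : List Int :=
  if period ≤ 0 ∨ amplitude ≤ 0 then
    (PySem.List.pyRange 0 length 1).map (fun _ => (0 : Int))
  else
    (PySem.List.pyRange 0 length 1).map (fun i2 =>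
      let pos := PySem.Int.mod i2 period
      let quarter0 := PySem.Int.floordiv period 4
      let quarter := if quarter0 = 0 then 1 else quarter0
      let half := PySem.Int.floordiv period 2
      if pos ≤ quarter then PySem.Int.floordiv (amplitude * pos) quarter
      else if pos ≤ half then PySem.Int.floordiv (amplitude * (half - pos)) quarter
      else if pos ≤ half + quarter then PySem.Int.floordiv (-amplitude * (pos - half)) quarter
      else PySem.Int.floordiv (-amplitude * (period - pos)) quarter)

-- ===== PORT B =====
-- helper: the per-position wave value used to fill the one-period table
def waveCell (amplitude : Int) (period : Int) (quarter : Int) (half : Int) (pos : Int) : Int :=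
  if pos ≤ quarter then PySem.Int.floordiv (amplitude * pos) quarter
  else if pos ≤ half then PySem.Int.floordiv (amplitude * (half - pos)) quarter
  else if pos ≤ half + quarter then PySem.Int.floordiv (-amplitude * (pos - half)) quarter
  else PySem.Int.floordiv (-amplitude * (period - pos)) quarter

def generate_wave_alt (amplitude : Int) (period : Int) (length : Int) : List Int :=
  if period ≤ 0 ∨ amplitude ≤ 0 then
    List.replicate length.toNat 0
  else
    let quarter0 := PySem.Int.floordiv period 4
    let quarter := if quarter0 = 0 then 1 else quarter0
    let half := PySem.Int.floordiv period 2
    let cycle := (PySem.List.pyRange 0 (min period length) 1).map (waveCell amplitude period quarter half)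
    (PySem.List.pyRange 0 length 1).map (fun i => PySem.List.pyGetD cycle (PySem.Int.mod i period) 0)

-- ===== PRECONDITION & SPEC =====
def Spec_generate_wave (amplitude : Int) (period : Int) (length : Int) (out : List Int) : Prop := out = generate_wave_alt amplitude period length
instance (amplitude : Int) (period : Int) (length : Int) (out : List Int) : Decidable (Spec_generate_wave amplitude period length out) := by unfold Spec_generate_wave; infer_instance

-- ===== CLAIM (what is proved, stated in full; the proofs are below) =====
def Claim_equal_generate_wave : Prop := ∀ (amplitude : Int) (period : Int) (length : Int), Dom_generate_wave amplitude period length → Spec_generate_wave amplitude period length (generate_wave amplitude period length)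

-- ===== LEMMAS AND PROOFS =====
theorem wave_eq (amplitude period length : Int) :
    generate_wave amplitude period length = generate_wave_alt amplitude period length := by
  unfold generate_wave generate_wave_alt
  split
  · simp [PySem.List.pyRange_one, List.map_map, Function.comp_def, List.map_const']
  · rename_i h
    have hp : 0 < period := by omega
    apply List.map_congr_left
    intro i hi
    rw [PySem.List.mem_pyRange_one] at hi
    have h0 : 0 ≤ PySem.Int.mod i period := by
      rw [PySem.Int.mod_eq_emod_of_pos hp]; exact Int.emod_nonneg i (by omega)
    have h1 : PySem.Int.mod i period < min period length := by
      rw [PySem.Int.mod_eq_emod_of_pos hp]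
      by_cases hle : period ≤ length
      · simp [min_eq_left hle]; exact Int.emod_lt_of_pos i hp
      · have : i % period = i := Int.emod_eq_of_lt hi.1 (by omega)
        -- period > length here
        omega
    rw [PySem.List.pyGetD_map_pyRange_of_nonneg _ _ _ _ h0 h1]
    simp [waveCell]

-- ===== VERDICT (by name: the statement is the Claim_ definition above) =====
theorem generate_wave_spec : Claim_equal_generate_wave := by
  intro a p l _
  unfold Spec_generate_wave
  exact wave_eq a p l
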